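-- pv_equiv track=rewrite | github.com/rdabrunk/Crosswords | Solving/puzzle_solver.py | fill_horizontal
-- ===== SOURCE A (Python) =====
-- def to_horizontal(grid):
--     horizontal_grid = []
--     for row in grid:
--         # split each row into a list of dashes, use periods as delimiters
--         row = ''.join(row).split('.')
--         horizontal_grid.append(row)
--     return horizontal_grid
--
-- def fill_horizontal(grid, word, location):
--     # locate the position of the word in the grid
--     horizontal_grid = to_horizontal(grid)
--     count = 0
--     x = 0
--     y = 0
--     while count != (location):
--         entry = horizontal_grid[y][x]
--         if x == len(horizontal_grid[y]) - 1:
--             y += 1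
--             x = 0
--             if entry != "":
--                 count += 1
--         elif entry == '':
--             x += 1
--         else:
--             x += 1
--             count += 1
--     while horizontal_grid[y][x] == '':
--         if x == len(horizontal_grid[y]) - 1:
--             y += 1
--             x = 0
--         else:
--             x += 1
--
--     # fill in the word
--     horizontal_grid[y][x] = word
--
--     # recreate the grid
--     grid = []
--     for i in range(len(horizontal_grid)):
--         row = '.'.join(horizontal_grid[i])
--         grid.append(row)
--     return grid
-- ===== SOURCE B (Python) =====
-- def fill_horizontal(grid, word, location):
--     # Row-level single pass: for each row, count its non-empty segments; the row
--     # that contains the `location`-th non-empty segment gets it replaced.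
--     if location < 0:
--         raise IndexError("list index out of range")
--     remaining = location
--     out = []
--     filled = False
--     for row in grid:
--         segs = row.split('.')
--         if not filled:
--             nonempty = sum(1 for s in segs if s != '')
--             if remaining < nonempty:
--                 k = -1
--                 for i, s in enumerate(segs):
--                     if s != '':
--                         k += 1
--                         if k == remaining:
--                             segs[i] = word
--                             break
--                 filled = True
--             else:
--                 remaining -= nonempty
--         out.append('.'.join(segs))
--     if not filled:
--         raise IndexError("list index out of range")
--     return out
-- ===== Notes on version B (the rewrite author's own statement) =====
-- stated objective: simpler
-- what changed: Replaces A's two manual (x,y)-cursor while-loops over a pre-built 2D segment grid (locate phase + skip-empties phase, then a separate rebuild pass) by a single row-level pass that splits each row, subtracts its non-empty-segment count from the remaining index, replaces the segment inside the one row that contains it, and emits each rebuilt row as it goes.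
import Mathlib
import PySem

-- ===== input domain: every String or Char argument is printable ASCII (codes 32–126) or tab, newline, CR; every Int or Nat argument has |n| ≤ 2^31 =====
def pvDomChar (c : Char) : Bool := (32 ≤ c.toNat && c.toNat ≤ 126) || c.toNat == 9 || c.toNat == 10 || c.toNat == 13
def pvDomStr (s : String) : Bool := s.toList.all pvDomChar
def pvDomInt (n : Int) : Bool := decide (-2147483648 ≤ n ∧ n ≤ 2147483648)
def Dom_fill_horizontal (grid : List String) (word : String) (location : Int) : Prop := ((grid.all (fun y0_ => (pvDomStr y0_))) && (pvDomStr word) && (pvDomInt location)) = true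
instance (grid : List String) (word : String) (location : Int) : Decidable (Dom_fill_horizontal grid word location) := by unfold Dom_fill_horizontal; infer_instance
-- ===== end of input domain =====

-- B replaces A's two manual (x,y)-cursor while-loops over the 2D segment grid by a single
-- row-level pass (subtract each row's non-empty-segment count, replace in the matching row).

-- ===== PORT A =====
-- row.split('.'); the separator "." is non-empty, so PySem.Str.split? is always `some`
-- and the `.getD []` default is never used.
def pySplitDot (s : String) : List String := (PySem.Str.split? s ".").getD []

def to_horizontal (grid : List String) : List (List String) :=
  -- ''.join(row) on a str is the string itself, so the loop body is row.split('.')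
  grid.foldl (fun acc row => acc ++ [pySplitDot row]) []

-- first while loop: while count != location, walk the (y,x) cursor.  `none` = IndexError.
-- fuel: the cursor advances strictly in row-major order each iteration, so the loop
-- terminates or raises within (total #segments + #rows + 2) steps; fuel exhaustion is unreachable.
def fhLoop1 (h : List (List String)) (location : Int) : Nat → Int → Nat → Nat → Option (Nat × Nat)
  | 0, _, _, _ => none
  | fuel+1, count, x, y =>
    if count = location then some (x, y)
    else
      match PySem.List.pyGet? h (y : Int) with
      | none => none
      | some row =>
        match PySem.List.pyGet? row (x : Int) with
        | none => none
        | some entry =>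
          if (x : Int) = (row.length : Int) - 1 then
            fhLoop1 h location fuel (if entry ≠ "" then count + 1 else count) 0 (y+1)
          else if entry = "" then
            fhLoop1 h location fuel count (x+1) y
          else
            fhLoop1 h location fuel (count+1) (x+1) y

-- second while loop: while horizontal_grid[y][x] == '', advance.  `none` = IndexError.
def fhLoop2 (h : List (List String)) : Nat → Nat → Nat → Option (Nat × Nat)
  | 0, _, _ => none
  | fuel+1, x, y =>
    match PySem.List.pyGet? h (y : Int) with
    | none => none
    | some row =>
      match PySem.List.pyGet? row (x : Int) with
      | none => none
      | some entry =>
        if entry = "" then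
          (if (x : Int) = (row.length : Int) - 1 then fhLoop2 h fuel 0 (y+1) else fhLoop2 h fuel (x+1) y)
        else some (x, y)

def fill_horizontal (grid : List String) (word : String) (location : Int) : List String :=
  let h := to_horizontal grid
  let fuel := ((h.map List.length).sum + h.length + 2)
  match fhLoop1 h location fuel 0 0 0 with
  | none => []          -- Python raises IndexError here (excluded by Pre_)
  | some (x, y) =>
    match fhLoop2 h fuel x y with
    | none => []        -- Python raises IndexError here (excluded by Pre_)
    | some (x, y) =>
      let h' := h.set y ((h.getD y []).set x word)   -- horizontal_grid[y][x] = word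
      (List.range h'.length).foldl (fun acc i => acc ++ [PySem.Str.join "." (h'.getD i [])]) []

-- ===== PORT B =====
-- inner loop of Source B: enumerate(segs) with counter k (starts at -1); replace and break.
def fhReplace (word : String) (rem : Int) : List String → Int → List String
  | [], _ => []
  | s :: rest, k =>
    if s ≠ "" then
      if k + 1 = rem then word :: rest
      else s :: fhReplace word rem rest (k + 1)
    else s :: fhReplace word rem rest k

-- loop body of Source B's single pass over the rows
def fhRowStep (word : String) (st : List String × Int × Bool) (row : String) : List String × Int × Bool :=
  match st with
  | (out, remaining, filled) =>
    let segs := pySplitDot row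
    if filled then (out ++ [PySem.Str.join "." segs], remaining, filled)
    else
      let ne : Int := ((segs.filter (fun s => s != "")).length : Int)
      if remaining < ne then
        (out ++ [PySem.Str.join "." (fhReplace word remaining segs (-1))], remaining, true)
      else (out ++ [PySem.Str.join "." segs], remaining - ne, false)

def fill_horizontal_alt (grid : List String) (word : String) (location : Int) : List String :=
  if location < 0 then []   -- Source B raises IndexError here (excluded by Pre_)
  else
    let st := grid.foldl (fhRowStep word) ([], location, false)
    if st.2.2 then st.1 else []   -- not filled: Source B raises IndexError (excluded by Pre_)

-- ===== PRECONDITION & SPEC =====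
-- Pre_: the location-th (0-based) non-empty period-separated segment exists; outside this
-- both A and B raise IndexError (A walks its cursor off the grid, B reports not filled).
def Pre_fill_horizontal (grid : List String) (word : String) (location : Int) : Prop :=
  0 ≤ location ∧
  location < ((grid.map (fun r => (((PySem.Str.split? r ".").getD []).filter (fun s => s != "")).length)).sum : Int)
instance (grid : List String) (word : String) (location : Int) : Decidable (Pre_fill_horizontal grid word location) := by unfold Pre_fill_horizontal; infer_instance

def pvWitness_fill_horizontal : List String × String × Int := (["ab.c", ".dd"], "xy", 1)

def Spec_fill_horizontal (grid : List String) (word : String) (location : Int) (out : List String) : Prop := out = fill_horizontal_alt grid word location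
instance (grid : List String) (word : String) (location : Int) (out : List String) : Decidable (Spec_fill_horizontal grid word location out) := by unfold Spec_fill_horizontal; infer_instance

-- ===== CLAIM (what is proved, stated in full; the proofs are below) =====
def Claim_equal_fill_horizontal : Prop := ∀ (grid : List String) (word : String) (location : Int), Dom_fill_horizontal grid word location → Pre_fill_horizontal grid word location → Spec_fill_horizontal grid word location (fill_horizontal grid word location)

-- ===== LEMMAS AND PROOFS =====

-- number of non-empty segments of a row
def fhCnt (r : List String) : Nat := (r.filter (fun s => s != "")).length

-- index of the k-th non-empty segment within a row
def fhNth : List String → Nat → Option Nat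
  | [], _ => none
  | s :: rest, k =>
    if s = "" then (fhNth rest k).map (· + 1)
    else match k with
      | 0 => some 0
      | k+1 => (fhNth rest k).map (· + 1)

-- replace the k-th non-empty segment, row-level recursion (the common normal form)
def fhFill (word : String) : List (List String) → Nat → Option (List (List String))
  | [], _ => none
  | r :: rs, k =>
    match fhNth r k with
    | some x => some ((r.set x word) :: rs)
    | none => (fhFill word rs (k - fhCnt r)).map (r :: ·)

-- (x,y)-position of the k-th non-empty segment at or after column x of the first row
def fhLoc : List (List String) → Nat → Nat → Option (Nat × Nat)
  | [], _, _ => none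
  | r :: rs, x, k =>
    match fhNth (r.drop x) k with
    | some d => some (x + d, 0)
    | none => (fhLoc rs 0 (k - fhCnt (r.drop x))).map (fun p => (p.1, p.2 + 1))

-- loop measure: cells remaining at or after (y,x), plus remaining rows
def fhMu (h : List (List String)) (y x : Nat) : Nat :=
  ((h.drop y).map List.length).sum + (h.length - y) - x

lemma splitOn_go_ne_nil (sep : List Char) : ∀ (fuel : Nat) (l cur : List Char) (acc : List (List Char)),
    PySem.Chars.splitOn.go sep fuel l cur acc ≠ [] := by
  intro fuel
  induction fuel with
  | zero => intro l cur acc; rw [PySem.Chars.splitOn.go.eq_def]; simp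
  | succ n ih =>
    intro l cur acc
    cases l with
    | nil => rw [PySem.Chars.splitOn.go.eq_def]; simp
    | cons c rest =>
      rw [PySem.Chars.splitOn.go.eq_def]
      simp only []
      split
      · exact ih _ _ _
      · exact ih _ _ _

lemma pySplitDot_ne_nil (s : String) : pySplitDot s ≠ [] := by
  have h := splitOn_go_ne_nil (".".toList) (s.toList.length + 1) s.toList [] []
  unfold pySplitDot PySem.Str.split? PySem.Chars.split? PySem.Chars.splitOn
  simpa using h

lemma foldl_append_map {α β : Type} (f : α → β) : ∀ (l : List α) (acc : List β),
    l.foldl (fun a r => a ++ [f r]) acc = acc ++ l.map f := by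
  intro l
  induction l with
  | nil => simp
  | cons r rest ih => intro acc; simp [List.foldl_cons, ih]

lemma to_horizontal_eq (grid : List String) :
    to_horizontal grid = grid.map pySplitDot := by
  unfold to_horizontal
  simpa using foldl_append_map pySplitDot grid []

lemma range_fold_join_aux (l : List (List String)) : ∀ (n : Nat), n ≤ l.length →
    (List.range n).foldl (fun acc i => acc ++ [PySem.Str.join "." (l.getD i [])]) []
      = (l.take n).map (fun r => PySem.Str.join "." r) := by
  intro n
  induction n with
  | zero => simp
  | succ m ih =>
    intro hm
    have hm' : m < l.length := by omega
    rw [List.range_succ, List.foldl_append, ih (by omega)]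
    have h1 : l.getD m [] = l[m] := List.getD_eq_getElem l [] hm'
    have h2 : l.take (m+1) = l.take m ++ [l[m]] := by
      rw [List.take_add_one, List.getElem?_eq_getElem hm']
      simp
    simp only [List.foldl_cons, List.foldl_nil, h1, h2, List.map_append, List.map_cons, List.map_nil]

lemma range_fold_join (l : List (List String)) :
    (List.range l.length).foldl (fun acc i => acc ++ [PySem.Str.join "." (l.getD i [])]) []
      = l.map (fun r => PySem.Str.join "." r) := by
  simpa using range_fold_join_aux l l.length le_rfl

lemma fhNth_none_iff (r : List String) (k : Nat) : fhNth r k = none ↔ fhCnt r ≤ k := by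
  induction r generalizing k with
  | nil => simp [fhNth, fhCnt]
  | cons s rest ih =>
    by_cases hs : s = ""
    · simp [fhNth, fhCnt, hs, Option.map_eq_none_iff, ih]
    · cases k with
      | zero => simp [fhNth, fhCnt, hs, List.filter_cons]
      | succ k => simp [fhNth, fhCnt, hs, List.filter_cons, Option.map_eq_none_iff, ih]

lemma fhCnt_cons (s : String) (rest : List String) :
    fhCnt (s :: rest) = (if s = "" then 0 else 1) + fhCnt rest := by
  by_cases hs : s = "" <;> simp [fhCnt, List.filter_cons, hs] <;> omega

lemma fhCnt_drop (r : List String) (x : Nat) (hx : x < r.length) :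
    fhCnt (r.drop x) = (if r[x] = "" then 0 else 1) + fhCnt (r.drop (x+1)) := by
  rw [List.drop_eq_getElem_cons hx, fhCnt_cons]

lemma fhLoc_skip (r : List String) (rs : List (List String)) (x k : Nat)
    (hx : x < r.length) (he : r[x] = "") :
    fhLoc (r :: rs) x k = fhLoc (r :: rs) (x+1) k := by
  have hc := fhCnt_drop r x hx
  rw [if_pos he] at hc
  simp only [fhLoc]
  rw [List.drop_eq_getElem_cons hx]
  simp only [fhNth, he, if_pos rfl]
  cases h : fhNth (r.drop (x+1)) k with
  | none => simp [h, fhCnt_cons]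
  | some d => simp [h]; omega

lemma fhLoc_consume (r : List String) (rs : List (List String)) (x k : Nat)
    (hx : x < r.length) (he : r[x] ≠ "") :
    fhLoc (r :: rs) x (k+1) = fhLoc (r :: rs) (x+1) k := by
  have hc := fhCnt_drop r x hx
  rw [if_neg he] at hc
  simp only [fhLoc]
  rw [List.drop_eq_getElem_cons hx]
  simp only [fhNth, if_neg he, fhCnt_cons, if_false]
  have harg : k + 1 - (1 + fhCnt (r.drop (x+1))) = k - fhCnt (r.drop (x+1)) := by omega
  rw [harg]
  cases h : fhNth (r.drop (x+1)) k with
  | none => simp [h]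
  | some d => simp [h]; omega

lemma fhLoc_head (r : List String) (rs : List (List String)) (x : Nat)
    (hx : x < r.length) (he : r[x] ≠ "") :
    fhLoc (r :: rs) x 0 = some (x, 0) := by
  simp only [fhLoc]
  rw [List.drop_eq_getElem_cons hx]
  simp [fhNth, if_neg he]

lemma fhLoc_nextrow (r : List String) (rs : List (List String)) (x k : Nat)
    (hlast : x + 1 = r.length) (hx : x < r.length)
    (hk : r[x] = "" ∨ k ≠ 0) :
    fhLoc (r :: rs) x k
      = (fhLoc rs 0 (k - (if r[x] = "" then 0 else 1))).map (fun p => (p.1, p.2 + 1)) := by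
  have hdrop : r.drop (x+1) = [] := by
    rw [hlast]; simp
  have hc := fhCnt_drop r x hx
  rw [hdrop] at hc
  simp only [fhLoc]
  rw [List.drop_eq_getElem_cons hx, hdrop]
  by_cases he : r[x] = ""
  · simp [fhNth, he, fhCnt]
  · rcases hk with hk | hk
    · exact absurd hk he
    · cases k with
      | zero => exact absurd rfl hk
      | succ k => simp [fhNth, he, fhCnt]

lemma getD_pos_of_ne_nil (h : List (List String)) (Hrows : ∀ r ∈ h, r ≠ []) (y : Nat)
    (hy : y < h.length) : 0 < (h.getD y []).length := by
  rw [List.getD_eq_getElem h [] hy]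
  have := Hrows _ (List.getElem_mem hy)
  exact List.length_pos_iff.mpr this

lemma loop2_eq (h : List (List String)) (Hrows : ∀ r ∈ h, r ≠ []) :
    ∀ fuel x y, y ≤ h.length → (y < h.length → x < (h.getD y []).length) →
    fhMu h y x + 1 ≤ fuel →
    fhLoop2 h fuel x y = (fhLoc (h.drop y) x 0).map (fun p => (p.1, y + p.2)) := by
  intro fuel
  induction fuel with
  | zero => intro x y _ _ hf; omega
  | succ n ih =>
    intro x y hy hx hf
    by_cases hyL : y < h.length
    case neg =>
      have hyE : y = h.length := by omega
      have hnone : PySem.List.pyGet? h (y : Int) = none := by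
        rw [PySem.List.pyGet?_natCast]; simp [hyE]
      simp [fhLoop2, hnone, hyE, fhLoc]
    case pos =>
      have hrow : h.getD y [] = h[y] := List.getD_eq_getElem h [] hyL
      have hxr : x < h[y].length := by rw [← hrow]; exact hx hyL
      have hget1 : PySem.List.pyGet? h (y : Int) = some h[y] := by
        rw [PySem.List.pyGet?_natCast]; exact List.getElem?_eq_getElem hyL
      have hget2 : PySem.List.pyGet? h[y] (x : Int) = some h[y][x] := by
        rw [PySem.List.pyGet?_natCast]; exact List.getElem?_eq_getElem hxr
      have hdropy : h.drop y = h[y] :: h.drop (y+1) := List.drop_eq_getElem_cons hyL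
      have hsum : ((h.drop y).map List.length).sum
          = h[y].length + ((h.drop (y+1)).map List.length).sum := by
        rw [hdropy, List.map_cons, List.sum_cons]
      simp only [fhLoop2, hget1, hget2]
      by_cases he : h[y][x] = ""
      case neg =>
        rw [if_neg he, hdropy, fhLoc_head _ _ _ hxr he]
        simp
      case pos =>
        rw [if_pos he]
        by_cases hlast : (x : Int) = (h[y].length : Int) - 1
        case pos =>
          rw [if_pos hlast]
          have hlast' : x + 1 = h[y].length := by omega
          have hmu : fhMu h (y+1) 0 + 1 ≤ n := by
            unfold fhMu at hf ⊢
            omega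
          rw [ih 0 (y+1) (by omega) (fun h1 => getD_pos_of_ne_nil h Hrows (y+1) h1) hmu]
          rw [hdropy, fhLoc_nextrow _ _ _ _ hlast' hxr (Or.inl he), if_pos he]
          cases hc : fhLoc (h.drop (y+1)) 0 (0 - 0) with
          | none => simp [hc]
          | some p => simp [hc, Prod.ext_iff]; omega
        case neg =>
          rw [if_neg hlast]
          have hx1 : x + 1 < h[y].length := by omega
          have hmu : fhMu h y (x+1) + 1 ≤ n := by
            unfold fhMu at hf ⊢
            omega
          rw [ih (x+1) y hy (fun _ => by rw [hrow]; exact hx1) hmu]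
          rw [hdropy, fhLoc_skip _ _ _ _ hxr he]

lemma loop12_eq (h : List (List String)) (Hrows : ∀ r ∈ h, r ≠ []) :
    ∀ fuel f2 (k : Nat) (c : Int) x y, y ≤ h.length →
    (y < h.length → x < (h.getD y []).length) →
    fhMu h y x + 1 ≤ fuel → fhMu h y x + 1 ≤ f2 →
    (match fhLoop1 h (c + k) fuel c x y with
     | none => none
     | some p => fhLoop2 h f2 p.1 p.2)
    = (fhLoc (h.drop y) x k).map (fun p => (p.1, y + p.2)) := by
  intro fuel
  induction fuel with
  | zero => intro f2 k c x y _ _ hf _; omega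
  | succ n ih =>
    intro f2 k c x y hy hx hf hf2
    cases k with
    | zero =>
      have hc0 : c + ((0 : Nat) : Int) = c := by simp
      rw [hc0]
      simp only [fhLoop1, if_pos rfl]
      exact loop2_eq h Hrows f2 x y hy hx hf2
    | succ k' =>
      have hcne : ¬ (c = c + (((k' + 1 : Nat)) : Int)) := by push_cast; omega
      by_cases hyL : y < h.length
      case neg =>
        have hyE : y = h.length := by omega
        have hnone : PySem.List.pyGet? h (y : Int) = none := by
          rw [PySem.List.pyGet?_natCast]; simp [hyE]
        simp only [fhLoop1]
        rw [if_neg hcne, hnone]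
        rw [hyE]
        simp [fhLoc]
      case pos =>
        have hrow : h.getD y [] = h[y] := List.getD_eq_getElem h [] hyL
        have hxr : x < h[y].length := by rw [← hrow]; exact hx hyL
        have hget1 : PySem.List.pyGet? h (y : Int) = some h[y] := by
          rw [PySem.List.pyGet?_natCast]; exact List.getElem?_eq_getElem hyL
        have hget2 : PySem.List.pyGet? h[y] (x : Int) = some h[y][x] := by
          rw [PySem.List.pyGet?_natCast]; exact List.getElem?_eq_getElem hxr
        have hdropy : h.drop y = h[y] :: h.drop (y+1) := List.drop_eq_getElem_cons hyL
        have hsum : ((h.drop y).map List.length).sum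
            = h[y].length + ((h.drop (y+1)).map List.length).sum := by
          rw [hdropy, List.map_cons, List.sum_cons]
        simp only [fhLoop1, if_neg hcne, hget1, hget2]
        by_cases hlast : (x : Int) = (h[y].length : Int) - 1
        case pos =>
          rw [if_pos hlast]
          have hlast' : x + 1 = h[y].length := by omega
          have hmu : fhMu h (y+1) 0 + 1 ≤ n := by unfold fhMu at hf ⊢; omega
          have hmu2 : fhMu h (y+1) 0 + 1 ≤ f2 := by unfold fhMu at hf2 ⊢; omega
          have hx' : y+1 < h.length → 0 < (h.getD (y+1) []).length :=
            fun h1 => getD_pos_of_ne_nil h Hrows (y+1) h1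
          by_cases he : h[y][x] = ""
          case pos =>
            rw [if_neg (not_not_intro he)]
            rw [ih f2 (k'+1) c 0 (y+1) (by omega) hx' hmu hmu2]
            rw [hdropy, fhLoc_nextrow _ _ _ _ hlast' hxr (Or.inl he), if_pos he]
            cases hc : fhLoc (h.drop (y+1)) 0 (k' + 1 - 0) with
            | none => simp [hc]
            | some p => simp [hc, Prod.ext_iff]; omega
          case neg =>
            rw [if_pos he]
            have hloc : c + (((k' + 1 : Nat)) : Int) = (c + 1) + ((k' : Nat) : Int) := by
              push_cast; ring
            rw [hloc, ih f2 k' (c+1) 0 (y+1) (by omega) hx' hmu hmu2]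
            rw [hdropy, fhLoc_nextrow _ _ _ _ hlast' hxr (Or.inr (Nat.succ_ne_zero k')), if_neg he]
            have : k' + 1 - 1 = k' := by omega
            rw [this]
            cases hc : fhLoc (h.drop (y+1)) 0 k' with
            | none => simp [hc]
            | some p => simp [hc, Prod.ext_iff]; omega
        case neg =>
          rw [if_neg hlast]
          have hx1 : x + 1 < h[y].length := by omega
          have hmu : fhMu h y (x+1) + 1 ≤ n := by unfold fhMu at hf ⊢; omega
          have hmu2 : fhMu h y (x+1) + 1 ≤ f2 := by unfold fhMu at hf2 ⊢; omega
          have hx'' : y < h.length → x + 1 < (h.getD y []).length := fun _ => by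
            rw [hrow]; exact hx1
          by_cases he : h[y][x] = ""
          case pos =>
            rw [if_pos he]
            rw [ih f2 (k'+1) c (x+1) y hy hx'' hmu hmu2]
            rw [hdropy, fhLoc_skip _ _ _ _ hxr he]
          case neg =>
            rw [if_neg he]
            have hloc : c + (((k' + 1 : Nat)) : Int) = (c + 1) + ((k' : Nat) : Int) := by
              push_cast; ring
            rw [hloc, ih f2 k' (c+1) (x+1) y hy hx'' hmu hmu2]
            rw [hdropy, fhLoc_consume _ _ _ _ hxr he]

lemma fhLoc_fill (word : String) : ∀ (rows : List (List String)) (k : Nat),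
    match fhLoc rows 0 k with
    | none => fhFill word rows k = none
    | some (x, y) =>
        y < rows.length ∧
        fhFill word rows k = some (rows.set y ((rows.getD y []).set x word)) := by
  intro rows
  induction rows with
  | nil => intro k; simp [fhLoc, fhFill]
  | cons r rs ih =>
    intro k
    have hdrop0 : r.drop 0 = r := by simp
    cases hn : fhNth r k with
    | some x =>
      simp only [fhLoc, hdrop0, hn]
      exact ⟨by simp, by simp [fhFill, hn]⟩
    | none =>
      simp only [fhLoc, hdrop0, hn]
      have := ih (k - fhCnt r)
      cases hc : fhLoc rs 0 (k - fhCnt r) with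
      | none =>
        rw [hc] at this
        simp [fhFill, hn, this]
      | some p =>
        rw [hc] at this
        obtain ⟨hlt, hfill⟩ := this
        cases p with
        | mk px py =>
          refine ⟨by simp; omega, ?_⟩
          simp [fhFill, hn, hfill]

lemma fhFill_none_iff (word : String) : ∀ (rows : List (List String)) (k : Nat),
    fhFill word rows k = none ↔ (rows.map fhCnt).sum ≤ k := by
  intro rows
  induction rows with
  | nil => intro k; simp [fhFill]
  | cons r rs ih =>
    intro k
    cases hn : fhNth r k with
    | some x =>
      have hk : ¬ (fhCnt r ≤ k) := by
        intro hle
        rw [← fhNth_none_iff] at hle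
        rw [hle] at hn; cases hn
      simp only [fhFill, hn]
      simp [List.sum_cons]
      omega
    | none =>
      have hk : fhCnt r ≤ k := (fhNth_none_iff r k).mp hn
      simp only [fhFill, hn, Option.map_eq_none_iff, ih]
      simp [List.sum_cons]
      omega

lemma fhReplace_eq_set (word : String) : ∀ (segs : List String) (k : Nat) (x : Nat) (kc : Int),
    fhNth segs k = some x → fhReplace word (kc + 1 + k) segs kc = segs.set x word := by
  intro segs
  induction segs with
  | nil => intro k x kc h; simp [fhNth] at h
  | cons s rest ih =>
    intro k x kc h
    by_cases hs : s = ""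
    · simp only [fhNth, if_pos hs] at h
      obtain ⟨x', hx', rfl⟩ := Option.map_eq_some_iff.mp h
      simp only [fhReplace, hs]
      simp
      exact ih k x' kc hx'
    · cases k with
      | zero =>
        simp only [fhNth, if_neg hs] at h
        have hx : x = 0 := by cases h; rfl
        subst hx
        simp only [fhReplace, if_neg hs]
        simp [hs]
      | succ k' =>
        simp only [fhNth, if_neg hs] at h
        obtain ⟨x', hx', rfl⟩ := Option.map_eq_some_iff.mp h
        have harg : kc + 1 + ((k' + 1 : Nat) : Int) = (kc + 1) + 1 + ((k' : Nat) : Int) := by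
          push_cast; ring
        have hne : ¬ (kc + 1 = kc + 1 + ((k' + 1 : Nat) : Int)) := by push_cast; omega
        simp only [fhReplace, hs]
        simp only [ne_eq, hs, not_false_iff, if_true, if_neg hne]
        rw [harg] at *
        simp [ih k' x' (kc + 1) hx']

lemma fold_filled (word : String) : ∀ (rows : List String) (out : List String) (rem : Int),
    rows.foldl (fhRowStep word) (out, rem, true)
      = (out ++ rows.map (fun r => PySem.Str.join "." (pySplitDot r)), rem, true) := by
  intro rows
  induction rows with
  | nil => intro out rem; simp
  | cons r rest ih =>
    intro out rem
    simp only [List.foldl_cons, fhRowStep, if_true]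
    rw [ih]
    simp

lemma fold_main (word : String) : ∀ (rows : List String) (k : Nat) (out : List String),
    match fhFill word (rows.map pySplitDot) k with
    | some h' =>
        (rows.foldl (fhRowStep word) (out, (k : Int), false)).1
            = out ++ h'.map (fun r => PySem.Str.join "." r) ∧
        (rows.foldl (fhRowStep word) (out, (k : Int), false)).2.2 = true
    | none =>
        rows.foldl (fhRowStep word) (out, (k : Int), false)
          = (out ++ rows.map (fun r => PySem.Str.join "." (pySplitDot r)),
             (k : Int) - (((rows.map (fun r => fhCnt (pySplitDot r))).sum : Nat) : Int), false) := by
  intro rows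
  induction rows with
  | nil => intro k out; simp [fhFill]
  | cons r rest ih =>
    intro k out
    simp only [List.map_cons, List.foldl_cons]
    cases hn : fhNth (pySplitDot r) k with
    | some x =>
      have hklt : k < fhCnt (pySplitDot r) := by
        by_contra hge
        have h0 : fhNth (pySplitDot r) k = none := (fhNth_none_iff _ _).mpr (by omega)
        rw [h0] at hn; cases hn
      have htest : (k : Int) < (((pySplitDot r).filter (fun s => s != "")).length : Int) := by
        exact_mod_cast hklt
      have hrep : fhReplace word ((k : Nat) : Int) (pySplitDot r) (-1) = (pySplitDot r).set x word := by
        have harg : ((k : Nat) : Int) = -1 + 1 + ((k : Nat) : Int) := by ring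
        rw [harg]
        exact fhReplace_eq_set word (pySplitDot r) k x (-1) hn
      simp only [fhRowStep, Bool.false_eq_true, if_false, if_pos htest, hrep]
      rw [fold_filled word rest _ _]
      simp only [fhFill, hn]
      constructor
      · simp
      · trivial
    | none =>
      have hge : fhCnt (pySplitDot r) ≤ k := (fhNth_none_iff _ _).mp hn
      have htest : ¬ ((k : Int) < (((pySplitDot r).filter (fun s => s != "")).length : Int)) := by
        have : (((pySplitDot r).filter (fun s => s != "")).length : Int) = (fhCnt (pySplitDot r) : Int) := rfl
        rw [this]
        exact_mod_cast not_lt.mpr hge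
      have hcast : (k : Int) - (((pySplitDot r).filter (fun s => s != "")).length : Int)
          = (((k - fhCnt (pySplitDot r) : Nat)) : Int) := by
        have : ((pySplitDot r).filter (fun s => s != "")).length = fhCnt (pySplitDot r) := rfl
        rw [this]
        push_cast
        omega
      simp only [fhRowStep, Bool.false_eq_true, if_false, if_neg htest, hcast]
      have hrec := ih (k - fhCnt (pySplitDot r)) (out ++ [PySem.Str.join "." (pySplitDot r)])
      simp only [fhFill, hn]
      cases hfr : fhFill word (rest.map pySplitDot) (k - fhCnt (pySplitDot r)) with
      | some h' =>
        rw [hfr] at hrec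
        obtain ⟨h1, h2⟩ := hrec
        simp only [Option.map_some]
        refine ⟨?_, h2⟩
        rw [h1]
        simp
      | none =>
        rw [hfr] at hrec
        simp only [Option.map_none]
        rw [hrec]
        refine Prod.ext ?_ (Prod.ext ?_ rfl)
        · simp
        · show (((k - fhCnt (pySplitDot r) : Nat)) : Int) - _ = _
          simp only [List.map_cons, List.sum_cons]
          omega

-- ===== VERDICT (by name: the statement is the Claim_ definition above) =====
theorem fill_horizontal_spec : Claim_equal_fill_horizontal := by
  intro grid word location _ hpre
  obtain ⟨hl0, hlt⟩ := hpre
  unfold Spec_fill_horizontal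
  have hloc : location = ((location.toNat : Nat) : Int) := (Int.toNat_of_nonneg hl0).symm
  set k := location.toNat with hk
  have hmapA : to_horizontal grid = grid.map pySplitDot := to_horizontal_eq grid
  have Hrows : ∀ r ∈ grid.map pySplitDot, r ≠ [] := by
    intro r hr
    obtain ⟨s, _, rfl⟩ := List.mem_map.mp hr
    exact pySplitDot_ne_nil s
  have hsum_eq : (grid.map (fun r => (((PySem.Str.split? r ".").getD []).filter (fun s => s != "")).length)).sum
      = ((grid.map pySplitDot).map fhCnt).sum := by
    rw [List.map_map]; rfl
  have hklt : k < ((grid.map pySplitDot).map fhCnt).sum := by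
    rw [← hsum_eq]
    omega
  -- the location-th non-empty segment exists
  have hfe : fhFill word (grid.map pySplitDot) k ≠ none := by
    intro hcontra
    rw [fhFill_none_iff] at hcontra
    omega
  have hlocfill := fhLoc_fill word (grid.map pySplitDot) k
  cases hlc : fhLoc (grid.map pySplitDot) 0 k with
  | none => rw [hlc] at hlocfill; exact absurd hlocfill hfe
  | some p =>
    rw [hlc] at hlocfill
    cases p with
    | mk px py =>
      obtain ⟨hylt, hfill⟩ := hlocfill
      -- A side
      have hmu0 : fhMu (grid.map pySplitDot) 0 0 + 1
          ≤ ((grid.map pySplitDot).map List.length).sum + (grid.map pySplitDot).length + 2 := by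
        unfold fhMu; simp
      have hE := loop12_eq (grid.map pySplitDot) Hrows
        (((grid.map pySplitDot).map List.length).sum + (grid.map pySplitDot).length + 2)
        (((grid.map pySplitDot).map List.length).sum + (grid.map pySplitDot).length + 2)
        k 0 0 0 (Nat.zero_le _)
        (fun h1 => getD_pos_of_ne_nil _ Hrows 0 h1) hmu0 hmu0
      rw [List.drop_zero, hlc] at hE
      have hc0 : ((0 : Int) + (k : Int)) = ((k : Nat) : Int) := by omega
      rw [hc0] at hE
      simp only [Option.map_some] at hE
      -- B side value
      have hB := fold_main word grid k []
      rw [hfill] at hB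
      obtain ⟨hb1, hb2⟩ := hB
      rw [hloc]
      simp only [fill_horizontal, fill_horizontal_alt, hmapA]
      rw [if_neg (by omega : ¬ ((k : Int) < 0))]
      rw [hb2, hb1]
      -- reduce A's nested matches using hE
      cases hl1 : fhLoop1 (grid.map pySplitDot) ((k : Nat) : Int)
          (((grid.map pySplitDot).map List.length).sum + (grid.map pySplitDot).length + 2) 0 0 0 with
      | none => rw [hl1] at hE; cases hE
      | some q =>
        cases q with
        | mk qx qy =>
          rw [hl1] at hE
          simp only at hE
          simp only [Nat.zero_add] at hE
          simp only [hE]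
          rw [range_fold_join]
          simp
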